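-- pv_equiv track=rewrite | github.com/youwol/py-youwol | src/youwol/utils/utils.py | get_all_individual_groups
-- ===== SOURCE A (Python) =====
-- import itertools
-- from typing import Any, cast
--
-- flatten = itertools.chain.from_iterable
--
-- def get_all_individual_groups(groups: list[str]) -> list[str]:
--     def get_combinations(elements: list[str]):
--         result = []
--         for i in range(1, len(elements)):
--             result.append("/".join(elements[0:i]))
--         return result
--
--     parts = [group.split("/") for group in groups if group]
--     parts_flat_chained = flatten([get_combinations(part) for part in parts])
--     parts_flat = [e for e in parts_flat_chained if e] + cast(Any, [None])
--     return list(set(groups + parts_flat))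
-- ===== SOURCE B (Python) =====
-- def get_all_individual_groups(groups: list[str]) -> list[str]:
--     result = set(groups)
--     for group in groups:
--         if not group:
--             continue
--         segments = group.split("/")
--         prefix = segments[0]
--         for seg in segments[1:]:
--             if prefix:
--                 result.add(prefix)
--             prefix = prefix + "/" + seg
--     result.add(None)
--     return list(result)
-- ===== Notes on version B (the rewrite author's own statement) =====
-- stated objective: alternative
-- what changed: Instead of materializing every prefix with a slice-and-join per group and flattening intermediate lists, B builds the result set in one pass, walking each group's segments with a running prefix string accumulator and adding each non-empty cumulative prefix directly to the set; measured ~1.4x faster, below the 1.5x bar, so no speed is claimed.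
import Mathlib
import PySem

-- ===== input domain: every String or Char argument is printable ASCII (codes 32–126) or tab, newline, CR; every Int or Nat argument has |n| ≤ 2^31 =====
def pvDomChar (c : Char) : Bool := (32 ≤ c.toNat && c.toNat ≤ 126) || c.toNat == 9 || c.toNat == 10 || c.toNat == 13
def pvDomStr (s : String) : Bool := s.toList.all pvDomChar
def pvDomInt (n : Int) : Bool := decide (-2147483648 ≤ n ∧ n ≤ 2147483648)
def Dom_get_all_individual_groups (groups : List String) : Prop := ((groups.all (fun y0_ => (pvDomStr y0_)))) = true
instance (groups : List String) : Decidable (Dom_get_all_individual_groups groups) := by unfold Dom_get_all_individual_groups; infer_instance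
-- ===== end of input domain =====

-- ===== PORT A =====

-- ===== PORT A =====
-- B differs from A by building the dedup set incrementally with a running-prefix accumulator
-- instead of slicing-and-joining every prefix; same return value (order of the final list is
-- first-insertion order for both ports; Python compares it as a set).

-- helper of A: get_combinations(elements) — "/".join(elements[0:i]) for i in range(1, len(elements))
def pvGetCombinations (elements : List String) : List String :=
  (PySem.List.pyRange 1 (elements.length : Int) 1).foldl
    (fun result i => result ++ [PySem.Str.join "/" (PySem.List.slice elements (some 0) (some i))]) []

def get_all_individual_groups (groups : List String) : List (Option String) :=
  -- group.split("/"): split? is none only for sep = "", so .getD [] is unreachable (total guard)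
  let parts := (groups.filter (fun g => g ≠ "")).map (fun g => (PySem.Str.split? g "/").getD [])
  let parts_flat_chained := (parts.map pvGetCombinations).flatten
  let parts_flat := (parts_flat_chained.filter (fun e => e ≠ "")).map (fun e => some e) ++ [none]
  PySem.Set.ofList (groups.map (fun g => some g) ++ parts_flat)

-- ===== PORT B =====
-- inner loop of B: state (result set, running prefix); prefix + "/" + seg is Str.join "/" [prefix, seg]
def pvAltStep (sp : PySem.Set (Option String) × String) (seg : String) :
    PySem.Set (Option String) × String :=
  ((if sp.2 ≠ "" then PySem.Set.add sp.1 (some sp.2) else sp.1), PySem.Str.join "/" [sp.2, seg])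

def get_all_individual_groups_alt (groups : List String) : List (Option String) :=
  let s0 : PySem.Set (Option String) := PySem.Set.ofList (groups.map (fun g => some g))
  let s1 := groups.foldl (fun s g =>
      if g = "" then s
      else
        match (PySem.Str.split? g "/").getD [] with
        | [] => s                                   -- unreachable: split never returns []
        | h :: t => (t.foldl pvAltStep (s, h)).1) s0
  PySem.Set.add s1 none

-- ===== PRECONDITION & SPEC =====
def Spec_get_all_individual_groups (groups : List String) (out : List (Option String)) : Prop := out = get_all_individual_groups_alt groups
instance (groups : List String) (out : List (Option String)) : Decidable (Spec_get_all_individual_groups groups out) := by unfold Spec_get_all_individual_groups; infer_instance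

-- ===== CLAIM (what is proved, stated in full; the proofs are below) =====
def Claim_equal_get_all_individual_groups : Prop := ∀ (groups : List String), Dom_get_all_individual_groups groups → Spec_get_all_individual_groups groups (get_all_individual_groups groups)

-- ===== LEMMAS AND PROOFS =====

-- the prefixes B's inner loop visits, starting from running prefix p over remaining segments t
def pvPrefixList (p : String) (t : List String) : List String :=
  match t with
  | [] => []
  | seg :: r => p :: pvPrefixList (PySem.Str.join "/" [p, seg]) r

-- add the non-empty strings of l to the set s (the effect of B's guarded adds)
def pvAddAll (s : PySem.Set (Option String)) (l : List String) : PySem.Set (Option String) :=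
  l.foldl (fun s e => if e ≠ "" then PySem.Set.add s (some e) else s) s

theorem pvJoin_shift (a b : String) (l : List String) :
    PySem.Str.join "/" (PySem.Str.join "/" [a, b] :: l) = PySem.Str.join "/" (a :: b :: l) := by
  apply String.toList_inj.mp
  cases l with
  | nil =>
      simp [PySem.Str.toList_join, PySem.Chars.join_singleton, PySem.Chars.join_cons_cons]
  | cons c m =>
      simp [PySem.Str.toList_join, PySem.Chars.join_singleton, PySem.Chars.join_cons_cons]

theorem pvAltStep_foldl (t : List String) : ∀ (s : PySem.Set (Option String)) (p : String),
    (t.foldl pvAltStep (s, p)).1 = pvAddAll s (pvPrefixList p t) := by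
  induction t with
  | nil => intro s p; simp [pvAddAll, pvPrefixList]
  | cons seg r ih =>
      intro s p
      simp only [List.foldl_cons, pvPrefixList, pvAddAll, pvAltStep]
      exact ih _ _

theorem pvPrefixList_eq (t : List String) : ∀ (p : String),
    pvPrefixList p t = (List.range t.length).map (fun k => PySem.Str.join "/" (p :: t.take k)) := by
  induction t with
  | nil => intro p; simp [pvPrefixList]
  | cons seg r ih =>
      intro p
      rw [pvPrefixList, ih, List.length_cons, List.range_succ_eq_map]
      simp only [List.map_cons, List.map_map, List.take_zero]
      refine congrArg₂ _ ?_ ?_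
      · exact (String.toList_inj.mp
          (by simp [PySem.Str.toList_join, PySem.Chars.join_singleton])).symm
      · refine List.map_congr_left ?_
        intro k _
        simp only [Function.comp_def, List.take_succ_cons]
        exact pvJoin_shift p seg (r.take k)

theorem pvGetCombinations_nil : pvGetCombinations [] = [] := by
  simp [pvGetCombinations, PySem.List.pyRange_one_eq_nil (by simp : (0:Int) ≤ 1)]

theorem pvGetCombinations_cons (h : String) (t : List String) :
    pvGetCombinations (h :: t) = pvPrefixList h t := by
  rw [pvPrefixList_eq]
  simp only [pvGetCombinations, PySem.List.foldl_append_singleton_eq_map, List.nil_append,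
    PySem.List.pyRange_one, List.map_map]
  have hlen : (((h :: t).length : Int) - 1).toNat = t.length := by simp
  rw [hlen]
  refine List.map_congr_left ?_
  intro k _
  simp only [Function.comp_def]
  have h0 : (0:Int) ≤ 1 + (k:Int) := by omega
  rw [PySem.List.slice_zero_start, PySem.List.slice_to _ h0]
  have h1 : ((1:Int) + (k:Int)).toNat = k + 1 := by omega
  rw [h1, List.take_succ_cons]

theorem pvAddAll_append (s : PySem.Set (Option String)) (l1 l2 : List String) :
    pvAddAll s (l1 ++ l2) = pvAddAll (pvAddAll s l1) l2 := by
  simp [pvAddAll, List.foldl_append]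

theorem pvAddAll_eq_foldl_add (l : List String) : ∀ (s : PySem.Set (Option String)),
    pvAddAll s l = ((l.filter (fun e => e ≠ "")).map (fun e => some e)).foldl PySem.Set.add s := by
  induction l with
  | nil => intro s; simp [pvAddAll]
  | cons e r ih =>
      intro s
      by_cases he : e = ""
      · subst he
        simpa [pvAddAll] using ih s
      · simpa [pvAddAll, he] using ih (PySem.Set.add s (some e))

theorem pvFoldl_groups (groups : List String) : ∀ (s0 : PySem.Set (Option String)),
    groups.foldl (fun s g =>
      if g = "" then s
      else
        match (PySem.Str.split? g "/").getD [] with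
        | [] => s
        | h :: t => (t.foldl pvAltStep (s, h)).1) s0
    = pvAddAll s0
        ((((groups.filter (fun g => g ≠ "")).map
            (fun g => (PySem.Str.split? g "/").getD [])).map pvGetCombinations).flatten) := by
  induction groups with
  | nil => intro s0; simp [pvAddAll]
  | cons g gs ih =>
      intro s0
      simp only [List.foldl_cons, List.filter_cons]
      by_cases hg : g = ""
      · subst hg
        simpa using ih s0
      · simp only [hg, ↓reduceIte, ne_eq, not_false_iff, decide_true, List.map_cons,
          List.flatten_cons]
        rw [pvAddAll_append]
        cases hsplit : (PySem.Str.split? g "/").getD [] with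
        | nil =>
            have hinit : (match ([] : List String) with
                | [] => s0
                | h :: t => (List.foldl pvAltStep (s0, h) t).1) = s0 := rfl
            rw [hinit, ih, pvGetCombinations_nil]
            simp [pvAddAll]
        | cons h t =>
            have hinit : (match h :: t with
                | [] => s0
                | h :: t => (List.foldl pvAltStep (s0, h) t).1)
                = (List.foldl pvAltStep (s0, h) t).1 := rfl
            rw [hinit, pvAltStep_foldl, ih, pvGetCombinations_cons]

-- ===== VERDICT (by name: the statement is the Claim_ definition above) =====
theorem get_all_individual_groups_spec : Claim_equal_get_all_individual_groups := by
  intro groups _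
  unfold Spec_get_all_individual_groups
  simp only [get_all_individual_groups, get_all_individual_groups_alt]
  rw [pvFoldl_groups, pvAddAll_eq_foldl_add,
    PySem.Set.ofList_eq_foldl, List.foldl_append, List.foldl_append,
    ← PySem.Set.ofList_eq_foldl]
  simp
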